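-- pv_equiv track=rewrite | github.com/Jacfger/zmk-new_corne | format_keymap.py | parse_bindings
-- ===== SOURCE A (Python) =====
-- def parse_bindings(text: str) -> list[str]:
--     tokens = text.split()
--     bindings, current = [], []
--     for tok in tokens:
--         if tok.startswith("&") and current:
--             bindings.append(" ".join(current))
--             current = [tok]
--         else:
--             current.append(tok)
--     if current:
--         bindings.append(" ".join(current))
--     return bindings
-- ===== SOURCE B (Python) =====
-- def parse_bindings(text: str) -> list[str]:
--     tokens = text.split()
--     out = []
--     i, n = 0, len(tokens)
--     while i < n:
--         j = next((k for k in range(i + 1, n) if tokens[k].startswith("&")), n)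
--         out.append(" ".join(tokens[i:j]))
--         i = j
--     return out
-- ===== Notes on version B (the rewrite author's own statement) =====
-- stated objective: alternative
-- what changed: B replaces A's running-accumulator loop (buffer flushed at each ampersand-prefixed token, plus a final flush) by a boundary scan: for each group start it finds the index of the next ampersand-prefixed token and emits the joined token slice directly, keeping no buffer.
import Mathlib
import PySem

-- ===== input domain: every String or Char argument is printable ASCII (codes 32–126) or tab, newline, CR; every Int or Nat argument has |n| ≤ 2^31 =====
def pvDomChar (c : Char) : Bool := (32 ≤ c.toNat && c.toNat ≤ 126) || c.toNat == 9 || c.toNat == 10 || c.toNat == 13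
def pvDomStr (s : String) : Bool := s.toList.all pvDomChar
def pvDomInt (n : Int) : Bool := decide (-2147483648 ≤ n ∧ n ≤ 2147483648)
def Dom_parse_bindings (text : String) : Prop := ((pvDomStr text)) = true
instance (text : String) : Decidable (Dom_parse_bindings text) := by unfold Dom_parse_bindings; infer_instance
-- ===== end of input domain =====

-- B replaces A's running-accumulator loop by a boundary scan that joins each token slice directly (alternative decomposition, same cost).

-- tok.startswith("&"), shared literal predicate of both sources
def pbAmp (t : String) : Bool := PySem.Str.startswith t "&"

-- ===== PORT A =====
-- one step of A's for-loop over the state (bindings, current)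
def pbStep (st : List String × List String) (tok : String) : List String × List String :=
  if pbAmp tok && !st.2.isEmpty then
    (st.1 ++ [PySem.Str.join " " st.2], [tok])
  else
    (st.1, st.2 ++ [tok])

def parse_bindings (text : String) : List String :=
  let tokens := PySem.Str.split₀ text
  let st := tokens.foldl pbStep ([], [])
  if !st.2.isEmpty then st.1 ++ [PySem.Str.join " " st.2] else st.1

-- ===== PORT B =====
-- B's while loop: each iteration finds the next '&'-token index (list length if none) and emits the joined slice
def pbGroups : List String → List String
  | [] => []
  | head :: rest =>
    let k := rest.findIdx pbAmp
    PySem.Str.join " " (head :: rest.take k) :: pbGroups (rest.drop k)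
termination_by l => l.length
decreasing_by
  simp only [List.length_drop, List.length_cons]
  omega

def parse_bindings_alt (text : String) : List String :=
  pbGroups (PySem.Str.split₀ text)

-- ===== PRECONDITION & SPEC =====
def Spec_parse_bindings (text : String) (out : List String) : Prop := out = parse_bindings_alt text
instance (text : String) (out : List String) : Decidable (Spec_parse_bindings text out) := by unfold Spec_parse_bindings; infer_instance

-- ===== CLAIM (what is proved, stated in full; the proofs are below) =====
def Claim_equal_parse_bindings : Prop := ∀ (text : String), Dom_parse_bindings text → Spec_parse_bindings text (parse_bindings text)

-- ===== LEMMAS AND PROOFS =====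

lemma pbGroups_nil : pbGroups [] = [] := by rw [pbGroups]

lemma take_findIdx_eq_takeWhile (xs : List String) :
    xs.take (xs.findIdx pbAmp) = xs.takeWhile (fun t => !pbAmp t) := by
  induction xs with
  | nil => simp
  | cons x xs ih =>
    cases h : pbAmp x <;> simp [List.findIdx_cons, h, ih]

lemma drop_findIdx_eq_dropWhile (xs : List String) :
    xs.drop (xs.findIdx pbAmp) = xs.dropWhile (fun t => !pbAmp t) := by
  induction xs with
  | nil => simp
  | cons x xs ih =>
    cases h : pbAmp x <;> simp [List.findIdx_cons, h, ih]

lemma pbGroups_cons (head : String) (rest : List String) :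
    pbGroups (head :: rest) =
      PySem.Str.join " " (head :: rest.takeWhile (fun t => !pbAmp t))
        :: pbGroups (rest.dropWhile (fun t => !pbAmp t)) := by
  rw [pbGroups, take_findIdx_eq_takeWhile, drop_findIdx_eq_dropWhile]

-- invariant of A's loop: with a nonempty 'current', flushing the fold equals
-- emitting 'current' extended by the tokens up to the next '&' and recursing on the rest
lemma loop_eq (tokens : List String) : ∀ (b c : List String), c ≠ [] →
    (let st := tokens.foldl pbStep (b, c);
     if !st.2.isEmpty then st.1 ++ [PySem.Str.join " " st.2] else st.1)
    = b ++ (PySem.Str.join " " (c ++ tokens.takeWhile (fun t => !pbAmp t))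
              :: pbGroups (tokens.dropWhile (fun t => !pbAmp t))) := by
  induction tokens with
  | nil =>
    intro b c hc
    simp [List.foldl, hc, pbGroups_nil]
  | cons t rest ih =>
    intro b c hc
    cases h : pbAmp t with
    | true =>
      have hstep : pbStep (b, c) t = (b ++ [PySem.Str.join " " c], [t]) := by
        simp [pbStep, h, hc]
      simp only [List.foldl_cons, hstep]
      rw [ih (b ++ [PySem.Str.join " " c]) [t] (by simp)]
      simp [h, pbGroups_cons]
    | false =>
      have hstep : pbStep (b, c) t = (b, c ++ [t]) := by
        simp [pbStep, h]
      simp only [List.foldl_cons, hstep]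
      rw [ih b (c ++ [t]) (by simp)]
      simp [h, List.append_assoc]

-- ===== VERDICT (by name: the statement is the Claim_ definition above) =====
theorem parse_bindings_spec : Claim_equal_parse_bindings := by
  intro text _
  unfold Spec_parse_bindings parse_bindings parse_bindings_alt
  cases htok : PySem.Str.split₀ text with
  | nil => simp [pbGroups_nil]
  | cons t rest =>
    have hstep : pbStep ([], []) t = ([], [t]) := by simp [pbStep]
    simp only [List.foldl_cons, hstep]
    rw [loop_eq rest [] [t] (by simp), pbGroups_cons]
    simp
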